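-- pv_equiv track=rewrite | github.com/taschini/advent | year2023/day10.py | find_main_loop
-- ===== SOURCE A (Python) =====
-- def find_main_loop(graph):
--     from itertools import count
--
--     start = list(graph)[-1]
--     mainloop = {start}
--     current = {start}
--     for k in count():
--         current = {n for v in current for n in graph[v] if n not in mainloop}
--         if not current:
--             break
--         mainloop |= current
--     return mainloop, k
-- ===== SOURCE B (Python) =====
-- def find_main_loop(graph):
--     from collections import deque
--     start = list(graph)[-1]
--     distances = {start: 0}
--     queue = deque([start])
--     while queue:
--         v = queue.popleft()
--         for n in graph[v]:
--             if n not in distances: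
--                 distances[n] = distances[v] + 1
--                 queue.append(n)
--     return set(distances), max(distances.values())
-- ===== Notes on version B (the rewrite author's own statement) =====
-- stated objective: alternative
-- what changed: Replaces A's level-synchronous loop over two frontier sets by a single queue-based BFS that pops one node at a time, labels each newly seen neighbour with distance[node]+1 in a dict, and returns (set(distances), max(distances.values())).
-- outside the precondition, e.g. on find_main_loop({(2,): [(1,)], (1,): [(9,)], (3,): []}): A returns ({(3,)}, 0), B returns ({(3,)}, 0)
import Mathlib
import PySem

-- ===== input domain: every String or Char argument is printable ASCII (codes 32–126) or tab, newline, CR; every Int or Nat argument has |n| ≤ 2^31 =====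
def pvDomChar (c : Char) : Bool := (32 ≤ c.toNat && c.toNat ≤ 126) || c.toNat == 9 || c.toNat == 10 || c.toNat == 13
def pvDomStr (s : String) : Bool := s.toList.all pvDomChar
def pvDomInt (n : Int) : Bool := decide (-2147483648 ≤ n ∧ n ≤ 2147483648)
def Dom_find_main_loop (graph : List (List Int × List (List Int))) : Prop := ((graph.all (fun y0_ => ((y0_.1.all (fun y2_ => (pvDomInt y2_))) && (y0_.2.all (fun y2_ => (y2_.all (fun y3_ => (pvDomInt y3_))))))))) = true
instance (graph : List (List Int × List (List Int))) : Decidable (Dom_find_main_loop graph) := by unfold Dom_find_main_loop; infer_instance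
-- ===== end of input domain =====

-- B replaces A's level-synchronous two-frontier-set loop by a single queue-based BFS carrying a
-- distance map, returning (set of visited nodes, max distance); objective: alternative (same cost).

-- ===== PORT A =====
-- the 'for k in count()' loop; fuel is a totality guard only (the loop adds ≥ 1 node per round)
def pvALoop (g : PySem.Dict (List Int) (List (List Int))) :
    Nat → PySem.Set (List Int) → PySem.Set (List Int) → Int → List (List Int) × Int
  | 0, mainloop, _, k => (mainloop, k)
  | fuel + 1, mainloop, current, k =>
    -- current = {n for v in current for n in graph[v] if n not in mainloop}
    let current' : PySem.Set (List Int) :=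
      current.foldl (fun acc v =>
        (g.getD v []).foldl (fun acc n =>
          if mainloop.contains n then acc else PySem.Set.add acc n) acc) PySem.Set.empty
    if current' = [] then (mainloop, k)                       -- if not current: break
    else pvALoop g fuel (PySem.Set.union mainloop current') current' (k + 1)  -- mainloop |= current

def find_main_loop (graph : List (List Int × List (List Int))) : List (List Int) × Int :=
  let g := PySem.Dict.ofList graph
  match PySem.List.pyGet? g.keys (-1) with    -- start = list(graph)[-1]; none = IndexError, outside Pre_
  | none => ([], 0)
  | some start =>
    pvALoop g (graph.length + 1) (PySem.Set.add PySem.Set.empty start)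
      (PySem.Set.add PySem.Set.empty start) 0

-- ===== PORT B =====
-- the 'while queue:' loop; one node popped per round, neighbours not yet in distances are
-- labelled distances[v] + 1 and enqueued; fuel is a totality guard only
def pvBLoop (g : PySem.Dict (List Int) (List (List Int))) :
    Nat → PySem.Dict (List Int) Int × List (List Int) → PySem.Dict (List Int) Int × List (List Int)
  | 0, st => st
  | _ + 1, (d, []) => (d, [])
  | fuel + 1, (d, v :: queue) =>
    pvBLoop g fuel ((g.getD v []).foldl
      (fun st n => if st.1.contains n then st
        else (st.1.insert n (st.1.getD v 0 + 1), st.2 ++ [n])) (d, queue))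

def find_main_loop_alt (graph : List (List Int × List (List Int))) : List (List Int) × Int :=
  let g := PySem.Dict.ofList graph
  match PySem.List.pyGet? g.keys (-1) with    -- start = list(graph)[-1]
  | none => ([], 0)
  | some start =>
    let st := pvBLoop g (graph.length + 1) ((PySem.Dict.empty).insert start 0, [start])
    (PySem.Set.ofList st.1.keys, (PySem.List.max? st.1.values (fun x => x)).getD 0)

-- ===== PRECONDITION & SPEC =====
-- Pre_ excludes the empty dict (A's 'list(graph)[-1]' raises IndexError) and graphs where the
-- start key or a key occurring as a neighbour has a dangling neighbour (one that is not a key):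
-- on such graphs A raises KeyError whenever the dangling reference is reached. This
-- over-approximates the reached nodes, so it is slightly narrower than A's true domain
-- (a dangling reference hanging off an UNREACHED such key never trips A), see the claim's cite.
def Pre_find_main_loop (graph : List (List Int × List (List Int))) : Prop :=
  graph ≠ [] ∧
  (∀ s ∈ (PySem.Dict.ofList graph).keys.getLast?,
    ∀ n ∈ (PySem.Dict.ofList graph).getD s [], n ∈ (PySem.Dict.ofList graph).keys) ∧
  (∀ p ∈ graph, ∀ n ∈ p.2, n ∈ graph.map Prod.fst →
    ∀ m ∈ (PySem.Dict.ofList graph).getD n [], m ∈ (PySem.Dict.ofList graph).keys)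
instance (graph : List (List Int × List (List Int))) : Decidable (Pre_find_main_loop graph) := by
  unfold Pre_find_main_loop; infer_instance

def pvWitness_find_main_loop : (List (List Int × List (List Int))) := [([1], [[2]]), ([2], [[1]])]

def Spec_find_main_loop (graph : List (List Int × List (List Int))) (out : List (List Int) × Int) : Prop := out = find_main_loop_alt graph
instance (graph : List (List Int × List (List Int))) (out : List (List Int) × Int) : Decidable (Spec_find_main_loop graph out) := by unfold Spec_find_main_loop; infer_instance

-- ===== CLAIM (what is proved, stated in full; the proofs are below) =====
def Claim_equal_find_main_loop : Prop := ∀ (graph : List (List Int × List (List Int))), Dom_find_main_loop graph → Pre_find_main_loop graph → Spec_find_main_loop graph (find_main_loop graph)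

-- ===== LEMMAS AND PROOFS =====

-- the nodes of ns not in seen, first occurrences, in order (the common 'new node' skeleton)
def pvDeltaN (seen : List (List Int)) : List (List Int) → List (List Int)
  | [] => []
  | n :: ns => if seen.contains n then pvDeltaN seen ns else n :: pvDeltaN (seen ++ [n]) ns

-- the new nodes discovered by scanning the neighbour lists of cur, given seen
def pvNewOf (g : PySem.Dict (List Int) (List (List Int))) (seen : List (List Int)) :
    List (List Int) → List (List Int)
  | [] => []
  | v :: cur => pvDeltaN seen (g.getD v []) ++
      pvNewOf g (seen ++ pvDeltaN seen (g.getD v [])) cur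

theorem pv_scontains_iff (s : List (List Int)) (x : List Int) :
    PySem.Set.contains s x = true ↔ x ∈ s := by
  simp [PySem.Set.contains, List.contains_iff_mem]

theorem pv_foldA_eq (ml : List (List Int)) :
    ∀ (ns acc : List (List Int)),
      ns.foldl (fun a n => if PySem.Set.contains ml n then a else PySem.Set.add a n) acc
        = acc ++ pvDeltaN (ml ++ acc) ns := by
  intro ns
  induction ns with
  | nil => intro acc; simp [pvDeltaN]
  | cons n ns ih =>
    intro acc
    simp only [List.foldl_cons, pvDeltaN]
    by_cases hm : PySem.Set.contains ml n
    · have h2 : (ml ++ acc).contains n = true :=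
        List.contains_iff_mem.mpr (List.mem_append.mpr (Or.inl ((pv_scontains_iff ml n).mp hm)))
      rw [if_pos hm, if_pos h2, ih]
    · by_cases ha : n ∈ acc
      · have h2 : (ml ++ acc).contains n = true :=
          List.contains_iff_mem.mpr (List.mem_append.mpr (Or.inr ha))
        have hadd : PySem.Set.add acc n = acc := by
          simp only [PySem.Set.add]
          rw [if_pos ((pv_scontains_iff acc n).mpr ha)]
        rw [if_neg hm, hadd, if_pos h2, ih]
      · have h2 : ¬ (ml ++ acc).contains n = true := by
          intro h
          rcases List.mem_append.mp (List.contains_iff_mem.mp h) with h | h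
          · exact hm ((pv_scontains_iff ml n).mpr h)
          · exact ha h
        have hadd : PySem.Set.add acc n = acc ++ [n] := by
          simp only [PySem.Set.add]
          rw [if_neg (fun h => ha ((pv_scontains_iff acc n).mp h))]
        rw [if_neg hm, hadd, if_neg h2, ih (acc ++ [n])]
        simp [List.append_assoc]


theorem pv_frontier_eq (g : PySem.Dict (List Int) (List (List Int))) (ml : List (List Int)) :
    ∀ (cur acc : List (List Int)),
      cur.foldl (fun acc v =>
          (g.getD v []).foldl (fun a n =>
            if PySem.Set.contains ml n then a else PySem.Set.add a n) acc) acc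
        = acc ++ pvNewOf g (ml ++ acc) cur := by
  intro cur
  induction cur with
  | nil => intro acc; simp [pvNewOf]
  | cons v cur ih =>
    intro acc
    simp only [List.foldl_cons, pvNewOf]
    rw [pv_foldA_eq, ih]
    simp [List.append_assoc]


theorem pv_deltaN_spec : ∀ (ns seen : List (List Int)),
    (pvDeltaN seen ns).Nodup ∧ ∀ x ∈ pvDeltaN seen ns, x ∉ seen ∧ x ∈ ns := by
  intro ns
  induction ns with
  | nil => intro seen; simp [pvDeltaN]
  | cons n ns ih =>
    intro seen
    simp only [pvDeltaN]
    by_cases h : seen.contains n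
    · rw [if_pos h]
      refine ⟨(ih seen).1, fun x hx => ?_⟩
      obtain ⟨h1, h2⟩ := (ih seen).2 x hx
      exact ⟨h1, by simp [h2]⟩
    · rw [if_neg h]
      have hn : n ∉ seen := fun hm => h (List.contains_iff_mem.mpr hm)
      constructor
      · refine List.Nodup.cons (fun hmem => ?_) (ih (seen ++ [n])).1
        have := ((ih (seen ++ [n])).2 n hmem).1
        simp at this
      · intro x hx
        rcases List.mem_cons.mp hx with hx | hx
        · exact ⟨by simpa [hx] using hn, by simp [hx]⟩
        · obtain ⟨h1, h2⟩ := (ih (seen ++ [n])).2 x hx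
          exact ⟨fun hm => h1 (by simp [hm]), by simp [h2]⟩


theorem pv_newOf_spec (g : PySem.Dict (List Int) (List (List Int))) :
    ∀ (cur seen : List (List Int)),
      (pvNewOf g seen cur).Nodup ∧
        ∀ x ∈ pvNewOf g seen cur, x ∉ seen ∧ ∃ v ∈ cur, x ∈ g.getD v [] := by
  intro cur
  induction cur with
  | nil => intro seen; simp [pvNewOf]
  | cons v cur ih =>
    intro seen
    simp only [pvNewOf]
    set d := pvDeltaN seen (g.getD v []) with hd
    obtain ⟨hdn, hdm⟩ := pv_deltaN_spec (g.getD v []) seen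
    obtain ⟨hrn, hrm⟩ := ih (seen ++ d)
    constructor
    · rw [List.nodup_append]
      refine ⟨by rw [hd]; exact hdn, hrn, fun a ha b hb hab => ?_⟩
      have := (hrm b hb).1
      subst hab
      exact this (by simp [ha])
    · intro x hx
      rcases List.mem_append.mp hx with hx | hx
      · obtain ⟨h1, h2⟩ := hdm x (by rw [hd] at hx; exact hx)
        exact ⟨h1, v, by simp, h2⟩
      · obtain ⟨h1, ⟨w, hw1, hw2⟩⟩ := hrm x hx
        exact ⟨fun hm => h1 (by simp [hm]), w, by simp [hw1], hw2⟩


theorem pv_set_update_append : ∀ (t s : List (List Int)), t.Nodup → (∀ x ∈ t, x ∉ s) →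
    PySem.Set.update s t = s ++ t := by
  intro t
  induction t with
  | nil => intro s _ _; simp [PySem.Set.update]
  | cons x t ih =>
    intro s hnd hdisj
    have hx : x ∉ s := hdisj x (by simp)
    have hadd : PySem.Set.add s x = s ++ [x] := by
      simp only [PySem.Set.add]
      rw [if_neg (fun h => hx ((pv_scontains_iff s x).mp h))]
    have hstep : PySem.Set.update s (x :: t) = PySem.Set.update (s ++ [x]) t := by
      simp only [PySem.Set.update, List.foldl_cons, hadd]
    have hd2 : ∀ y ∈ t, y ∉ s ++ [x] := by
      intro y hy
      simp only [List.mem_append, List.mem_singleton]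
      rintro (h | rfl)
      · exact hdisj y (by simp [hy]) h
      · exact (List.nodup_cons.mp hnd).1 hy
    rw [hstep, ih (s ++ [x]) (List.nodup_cons.mp hnd).2 hd2]
    simp


theorem pv_get?_mk_append (I J : List (List Int × Int)) (x : List Int) (w : Int)
    (h : (PySem.Dict.mk I).get? x = some w) :
    (PySem.Dict.mk (I ++ J)).get? x = some w := by
  simp only [PySem.Dict.get?] at *
  rw [List.find?_append]
  rcases hfind : List.find? (fun p => p.1 == x) I with _ | p
  · simp [hfind] at h
  · simp [hfind] at h ⊢
    exact h


theorem pv_bstep_fold (g : PySem.Dict (List Int) (List (List Int))) (v : List Int) (k : Int) :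
    ∀ (ns : List (List Int)) (d : PySem.Dict (List Int) Int) (q : List (List Int)),
      d.get? v = some k →
      ns.foldl (fun st n => if st.1.contains n then st
          else (st.1.insert n (st.1.getD v 0 + 1), st.2 ++ [n])) (d, q)
        = (PySem.Dict.mk (d.items ++ (pvDeltaN d.keys ns).map (fun n => (n, k + 1))),
           q ++ pvDeltaN d.keys ns) := by
  intro ns
  induction ns with
  | nil => intro d q _; simp [pvDeltaN]
  | cons n ns ih =>
    intro d q h
    simp only [List.foldl_cons, pvDeltaN]
    by_cases hc : d.contains n
    · have hk : d.keys.contains n = true :=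
        List.contains_iff_mem.mpr ((PySem.Dict.contains_iff_mem_keys d n).mp hc)
      rw [if_pos hc, if_pos hk]
      exact ih d q h
    · have hk : ¬ d.keys.contains n = true := fun hh =>
        hc ((PySem.Dict.contains_iff_mem_keys d n).mpr (List.contains_iff_mem.mp hh))
      have hcf : d.contains n = false := Bool.eq_false_iff.mpr hc
      rw [if_neg hc, if_neg hk]
      have hg : d.getD v 0 = k := by
        rw [PySem.Dict.getD_eq_get?_getD, h]; rfl
      have hvc : d.contains v = true := by
        rw [PySem.Dict.contains_eq_isSome_get?, h]; rfl
      have hvne : v ≠ n := fun e => by rw [e] at hvc; rw [hvc] at hcf; cases hcf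
      have hitems : (d.insert n (d.getD v 0 + 1)).items = d.items ++ [(n, k + 1)] := by
        rw [hg]; exact PySem.Dict.items_insert_of_not_contains d (k + 1) hcf
      have hkeys : (d.insert n (d.getD v 0 + 1)).keys = d.keys ++ [n] := by
        simp only [PySem.Dict.keys, hitems, List.map_append, List.map_cons, List.map_nil]
      have h1 : (d.insert n (d.getD v 0 + 1)).get? v = some k := by
        rw [hg, PySem.Dict.get?_insert_of_ne d (k + 1) hvne]; exact h
      rw [ih _ _ h1, hitems, hkeys]
      simp [List.append_assoc]


theorem pv_bloop_nil (g : PySem.Dict (List Int) (List (List Int)))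
    (f : Nat) (d : PySem.Dict (List Int) Int) : pvBLoop g f (d, []) = (d, []) := by
  cases f <;> rfl

theorem pv_level (g : PySem.Dict (List Int) (List (List Int))) (k : Int) :
    ∀ (cur : List (List Int)) (d : PySem.Dict (List Int) Int) (rest : List (List Int)) (f : Nat),
      (∀ v ∈ cur, d.get? v = some k) →
      pvBLoop g (f + cur.length) (d, cur ++ rest)
        = pvBLoop g f
            (PySem.Dict.mk (d.items ++ (pvNewOf g d.keys cur).map (fun n => (n, k + 1))),
             rest ++ pvNewOf g d.keys cur) := by
  intro cur
  induction cur with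
  | nil =>
    intro d rest f _
    simp [pvNewOf]
  | cons v cur ih =>
    intro d rest f h
    have hv : d.get? v = some k := h v (by simp)
    have hstep : f + (v :: cur).length = (f + cur.length) + 1 := by
      simp [List.length_cons]; omega
    rw [hstep]
    show pvBLoop g ((f + cur.length) + 1) (d, v :: (cur ++ rest)) = _
    rw [pvBLoop]
    rw [pv_bstep_fold g v k (g.getD v []) d (cur ++ rest) hv]
    set δ := pvDeltaN d.keys (g.getD v []) with hδ
    set d1 := PySem.Dict.mk (d.items ++ δ.map (fun n => (n, k + 1))) with hd1
    have hd1items : d1.items = d.items ++ δ.map (fun n => (n, k + 1)) := rfl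
    have hd1keys : d1.keys = d.keys ++ δ := by
      simp [PySem.Dict.keys, hd1items, List.map_append, List.map_map]
      exact List.map_id δ
    have h' : ∀ w ∈ cur, d1.get? w = some k := fun w hw =>
      pv_get?_mk_append d.items (δ.map (fun n => (n, k + 1))) w k (h w (by simp [hw]))
    have hq : (cur ++ rest) ++ δ = cur ++ (rest ++ δ) := by simp [List.append_assoc]
    rw [hq, ih d1 (rest ++ δ) f h']
    simp only [pvNewOf, ← hδ, hd1keys, hd1items]
    rw [List.map_append]
    simp [List.append_assoc]


def pvMaxStep (acc : Option Int) (x : Int) : Option Int :=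
  match acc with
  | none => some x
  | some m => if m < x then some x else some m

theorem pv_max_lemma (k : Int) : ∀ (vals : List Int) (acc : Option Int),
    (∀ x ∈ vals, x ≤ k) → ((k ∈ vals ∨ acc = some k) ∧ ∀ m, acc = some m → m ≤ k) →
    vals.foldl pvMaxStep acc = some k := by
  intro vals
  induction vals with
  | nil =>
    intro acc _ h
    rcases h.1 with h1 | h1
    · cases h1
    · simpa using h1
  | cons x vals ih =>
    intro acc hb h
    have hx : x ≤ k := hb x (by simp)
    simp only [List.foldl_cons]
    rcases acc with _ | m
    · simp only [pvMaxStep]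
      apply ih
      · intro y hy; exact hb y (by simp [hy])
      · constructor
        · rcases h.1 with h1 | h1
          · rcases List.mem_cons.mp h1 with h2 | h2
            · exact Or.inr (by rw [h2])
            · exact Or.inl h2
          · cases h1
        · intro m hm
          injection hm with hm
          omega
    · have hm : m ≤ k := h.2 m rfl
      by_cases hlt : m < x
      · simp only [pvMaxStep]
        rw [if_pos hlt]
        apply ih
        · intro y hy; exact hb y (by simp [hy])
        · constructor
          · rcases h.1 with h1 | h1
            · rcases List.mem_cons.mp h1 with h2 | h2
              · exact Or.inr (by rw [h2])
              · exact Or.inl h2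
            · injection h1 with h1
              exact Or.inr (by congr 1; omega)
          · intro m' hm'
            injection hm' with hm'
            omega
      · simp only [pvMaxStep]
        rw [if_neg hlt]
        apply ih
        · intro y hy; exact hb y (by simp [hy])
        · constructor
          · rcases h.1 with h1 | h1
            · rcases List.mem_cons.mp h1 with h2 | h2
              · exact Or.inr (by congr 1; omega)
              · exact Or.inl h2
            · exact Or.inr h1
          · intro m' hm'
            injection hm' with hm'
            omega


theorem pv_max?_eq (vals : List Int) :
    PySem.List.max? vals (fun x => x) = vals.foldl pvMaxStep none := by
  unfold PySem.List.max? pvMaxStep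
  congr 1
  funext acc x
  cases acc <;> rfl

theorem pv_pyGet?_mem (xs : List (List Int)) (i : Int) (x : List Int)
    (h : PySem.List.pyGet? xs i = some x) : x ∈ xs := by
  simp only [PySem.List.pyGet?] at h
  rcases hk : PySem.List.pyIdx? xs.length i with _ | n
  · rw [hk] at h; cases h
  · rw [hk] at h
    simp only [Option.bind_some] at h
    exact List.mem_of_getElem? h

theorem pv_pyGet?_last (xs : List (List Int)) (x : List Int)
    (h : PySem.List.pyGet? xs (-1) = some x) : xs.getLast? = some x := by
  simp only [PySem.List.pyGet?, PySem.List.pyIdx?] at h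
  by_cases hlen : (1 : Int) ≤ (xs.length : Int)
  · rw [if_neg (by omega), if_pos (by omega)] at h
    simp only [Option.bind_some] at h
    rw [List.getLast?_eq_getElem?]
    have : (-(-1 : Int)).toNat = 1 := rfl
    rw [this] at h
    exact h
  · rw [if_neg (by omega), if_neg (by omega)] at h
    cases h

theorem pv_nodup_len_le (l l' : List (List Int)) (hnd : l.Nodup) (hsub : ∀ x ∈ l, x ∈ l') :
    l.length ≤ l'.length := by
  calc l.length = l.toFinset.card := (List.toFinset_card_of_nodup hnd).symm
    _ ≤ l'.toFinset.card := Finset.card_le_card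
        (fun x hx => List.mem_toFinset.mpr (hsub x (List.mem_toFinset.mp hx)))
    _ ≤ l'.length := l'.toFinset_card_le

theorem pv_master (g : PySem.Dict (List Int) (List (List Int)))
    (HK : g.keys.Nodup)
    (HN : ∀ v n : List Int, n ∈ g.getD v [] → n ∈ g.keys → ∀ m ∈ g.getD n [], m ∈ g.keys) :
    ∀ (fA : Nat) (I : List (List Int × Int)) (cur : List (List Int)) (k : Int) (fB : Nat),
      (I.map Prod.fst ++ cur).Nodup →
      (∀ x ∈ I.map Prod.fst ++ cur, x ∈ g.keys) →
      (∀ x ∈ I.map Prod.fst ++ cur, ∀ m ∈ g.getD x [], m ∈ g.keys) →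
      (∀ p ∈ I, p.2 < k) →
      cur ≠ [] →
      g.keys.length + 1 ≤ fA + I.length + cur.length →
      g.keys.length + cur.length ≤ fB + I.length + cur.length →
      pvALoop g fA (I.map Prod.fst ++ cur) cur k
        = ((PySem.Set.ofList
              (pvBLoop g fB (PySem.Dict.mk (I ++ cur.map (fun n => (n, k))), cur)).1.keys),
           (PySem.List.max?
              (pvBLoop g fB (PySem.Dict.mk (I ++ cur.map (fun n => (n, k))), cur)).1.values
              (fun x => x)).getD 0) := by
  intro fA
  induction fA with
  | zero =>
    intro I cur k fB hnd hsub hOK hvals hne hfa hfb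
    exfalso
    have hlen : (I.map Prod.fst ++ cur).length ≤ g.keys.length :=
      pv_nodup_len_le _ _ hnd hsub
    simp [List.length_append] at hlen
    omega
  | succ fA ih =>
    intro I cur k fB hnd hsub hOK hvals hne hfa hfb
    have hml : (PySem.Dict.mk (I ++ cur.map (fun n => (n, k)))).keys
        = I.map Prod.fst ++ cur := by
      simp [PySem.Dict.keys, List.map_append, List.map_map]
      exact List.map_id cur
    have hlen : (I.map Prod.fst ++ cur).length ≤ g.keys.length :=
      pv_nodup_len_le _ _ hnd hsub
    have hlen2 : I.length + cur.length ≤ g.keys.length := by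
      simpa [List.length_append] using hlen
    obtain ⟨hnn, hnm⟩ := pv_newOf_spec g cur (I.map Prod.fst ++ cur)
    have hgetcur : ∀ v ∈ cur,
        (PySem.Dict.mk (I ++ cur.map (fun n => (n, k)))).get? v = some k := by
      intro v hv
      apply PySem.Dict.get?_of_mem_items
      · show (v, k) ∈ I ++ cur.map (fun n => (n, k))
        exact List.mem_append.mpr (Or.inr (List.mem_map.mpr ⟨v, hv, rfl⟩))
      · rw [hml]; exact hnd
    obtain ⟨f, rfl⟩ : ∃ f, fB = f + cur.length := ⟨fB - cur.length, by omega⟩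
    have hlev := pv_level g k cur (PySem.Dict.mk (I ++ cur.map (fun n => (n, k)))) [] f hgetcur
    simp only [List.append_nil, List.nil_append, hml] at hlev
    rw [pvALoop]
    rw [pv_frontier_eq g (I.map Prod.fst ++ cur) cur PySem.Set.empty]
    have hemp : (PySem.Set.empty : List (List Int)) = [] := rfl
    rw [hemp, List.nil_append, List.append_nil]
    by_cases hn : pvNewOf g (I.map Prod.fst ++ cur) cur = []
    · rw [if_pos hn]
      rw [hlev, hn]
      simp only [List.map_nil, List.append_nil, pv_bloop_nil]
      have hkeq : (PySem.Dict.mk (I ++ cur.map (fun n => (n, k)))).keys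
          = I.map Prod.fst ++ cur := hml
      rw [hkeq, PySem.Set.ofList_eq_self_of_nodup _ hnd]
      have hvalseq : (PySem.Dict.mk (I ++ cur.map (fun n => (n, k)))).values
          = I.map Prod.snd ++ cur.map (fun _ => k) := by
        simp only [PySem.Dict.values, List.map_append, List.map_map]
        rfl
      rw [pv_max?_eq, hvalseq]
      rw [pv_max_lemma k]
      · rfl
      · intro x hx
        rcases List.mem_append.mp hx with hx | hx
        · obtain ⟨p, hp, rfl⟩ := List.mem_map.mp hx
          exact le_of_lt (hvals p hp)
        · obtain ⟨_, _, rfl⟩ := List.mem_map.mp hx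
          exact le_refl k
      · constructor
        · left
          rcases cur with _ | ⟨c, cur⟩
          · exact absurd rfl hne
          · exact List.mem_append.mpr (Or.inr (by simp))
        · intro m hm; cases hm
    · rw [if_neg hn]
      have hunion : PySem.Set.union (I.map Prod.fst ++ cur)
          (pvNewOf g (I.map Prod.fst ++ cur) cur)
          = (I.map Prod.fst ++ cur) ++ pvNewOf g (I.map Prod.fst ++ cur) cur := by
        simp only [PySem.Set.union]
        exact pv_set_update_append _ _ hnn (fun x hx => (hnm x hx).1)
      rw [hunion, hlev]
      have hI' : ((I ++ cur.map (fun n => (n, k))).map Prod.fst)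
          = I.map Prod.fst ++ cur := by
        simp [List.map_append, List.map_map]
        exact List.map_id cur
      have hres := ih (I ++ cur.map (fun n => (n, k)))
        (pvNewOf g (I.map Prod.fst ++ cur) cur) (k + 1) f
        (by rw [hI']
            rw [List.nodup_append]
            exact ⟨hnd, hnn, fun a ha b hb hab => (hnm b hb).1 (hab ▸ ha)⟩)
        (by rw [hI']
            intro x hx
            rcases List.mem_append.mp hx with hx | hx
            · exact hsub x hx
            · obtain ⟨_, ⟨v, hv1, hv2⟩⟩ := hnm x hx
              exact hOK v (List.mem_append.mpr (Or.inr hv1)) x hv2)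
        (by rw [hI']
            intro x hx
            rcases List.mem_append.mp hx with hx | hx
            · exact hOK x hx
            · obtain ⟨_, ⟨v, hv1, hv2⟩⟩ := hnm x hx
              have hxk : g.keys.Mem x := hOK v (List.mem_append.mpr (Or.inr hv1)) x hv2
              exact HN v x hv2 hxk)
        (by intro p hp
            rcases List.mem_append.mp hp with hp | hp
            · exact lt_trans (hvals p hp) (by omega)
            · obtain ⟨_, _, rfl⟩ := List.mem_map.mp hp
              omega)
        hn
        (by have h1 : 1 ≤ (pvNewOf g (I.map Prod.fst ++ cur) cur).length := by
              rcases hhead : pvNewOf g (I.map Prod.fst ++ cur) cur with _ | ⟨a, b⟩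
              · exact absurd hhead hn
              · simp
            simp only [List.length_append, List.length_map]
            omega)
        (by simp only [List.length_append, List.length_map]
            omega)
      rw [hI'] at hres
      rw [hres]


theorem pv_items_ofList_sub (graph : List (List Int × List (List Int))) :
    ∀ p ∈ (PySem.Dict.ofList graph).items, p ∈ graph := by
  have main : ∀ (ps : List (List Int × List (List Int))) (d : PySem.Dict (List Int) (List (List Int))) (p : List Int × List (List Int)),
      p ∈ (d.update ps).items → p ∈ d.items ∨ p ∈ ps := by
    intro ps
    induction ps with
    | nil => intro d p h; exact Or.inl h
    | cons q ps ih =>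
      intro d p h
      have h2 := ih (d.insert q.1 q.2) p h
      rcases h2 with h2 | h2
      · rcases (PySem.Dict.mem_items_insert d q.1 q.2 p).mp h2 with h3 | h3
        · exact Or.inr (by simp [h3])
        · exact Or.inl h3.1
      · exact Or.inr (by simp [h2])
  intro p hp
  rcases main graph PySem.Dict.empty p hp with h | h
  · simp [PySem.Dict.empty] at h
  · exact h


theorem pv_keys_ofList (graph : List (List Int × List (List Int))) :
    (PySem.Dict.ofList graph).keys = PySem.Set.ofList (graph.map Prod.fst) := by
  have : PySem.Dict.ofList graph = List.foldl (fun d x => d.insert x.1 ((fun (_ : PySem.Dict (List Int) (List (List Int))) (x : List Int × List (List Int)) => x.2) d x)) PySem.Dict.empty graph := rfl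
  rw [this, PySem.Dict.keys_foldl_insert_key]
  simp [PySem.Dict.keys, PySem.Dict.empty, PySem.Set.update_nil_left]


-- ===== VERDICT (by name: the statement is the Claim_ definition above) =====
theorem find_main_loop_spec : Claim_equal_find_main_loop := by
  intro graph _ hPre
  unfold Spec_find_main_loop find_main_loop find_main_loop_alt
  have HK : (PySem.Dict.ofList graph).keys.Nodup := PySem.Dict.nodup_keys_ofList graph
  have HN : ∀ v n : List Int, n ∈ (PySem.Dict.ofList graph).getD v [] →
      n ∈ (PySem.Dict.ofList graph).keys →
      ∀ m ∈ (PySem.Dict.ofList graph).getD n [], m ∈ (PySem.Dict.ofList graph).keys := by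
    intro v n hn hnk m hm
    rw [PySem.Dict.getD_eq_get?_getD] at hn
    rcases hv : (PySem.Dict.ofList graph).get? v with _ | ns
    · rw [hv] at hn; cases hn
    · rw [hv] at hn
      simp only [Option.getD_some] at hn
      have hmem := PySem.Dict.mem_items_of_get?_eq_some _ hv
      have hpg := pv_items_ofList_sub graph _ hmem
      have hnk' : n ∈ graph.map Prod.fst := by
        rw [pv_keys_ofList] at hnk
        exact (PySem.Set.mem_ofList _ _).mp hnk
      exact hPre.2.2 (v, ns) hpg n hn hnk' m hm
  cases hstart : PySem.List.pyGet? (PySem.Dict.ofList graph).keys (-1) with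
  | none => simp only [hstart]
  | some start =>
    simp only [hstart]
    have hsk : start ∈ (PySem.Dict.ofList graph).keys :=
      pv_pyGet?_mem _ _ _ hstart
    have hkl : (PySem.Dict.ofList graph).keys.length ≤ graph.length := by
      rw [pv_keys_ofList]
      calc (PySem.Set.ofList (graph.map Prod.fst)).length
          ≤ (graph.map Prod.fst).length := PySem.Set.length_ofList_le _
        _ = graph.length := List.length_map ..
    have hstartset : (PySem.Set.add PySem.Set.empty start) = [start] := rfl
    have hd0 : ((PySem.Dict.empty : PySem.Dict (List Int) Int).insert start 0)
        = PySem.Dict.mk ([] ++ [start].map (fun n => (n, (0 : Int)))) := rfl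
    rw [hstartset, hd0]
    have hOK0 : ∀ x ∈ ([start] : List (List Int)),
        ∀ m ∈ (PySem.Dict.ofList graph).getD x [], m ∈ (PySem.Dict.ofList graph).keys := by
      intro x hx m hm
      simp only [List.mem_singleton] at hx
      rw [hx] at hm
      exact hPre.2.1 start (pv_pyGet?_last _ _ hstart) m hm
    have := pv_master (PySem.Dict.ofList graph) HK HN (graph.length + 1) [] [start] 0
      (graph.length + 1)
      (by simp)
      (by intro x hx; simp at hx; rw [hx]; exact hsk)
      (by simpa using hOK0)
      (by intro p hp; cases hp)
      (by simp)
      (by simp; omega)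
      (by simp; omega)
    simpa using this
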